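-- pv_equiv track=rewrite | github.com/pypi-data/pypi-mirror-378 | packages/qupepfold/qupepfold-0.5.0-py3-none-any.whl/qupepfold/qupepfold.py | _infer_secondary_from_turns
-- ===== SOURCE A (Python) =====
-- def _infer_secondary_from_turns(turns):
--     n = len(turns) + 1
--     ss = ["C"] * n
--     for i in range(n - 1):
--         win = turns[max(0, i - 2):min(len(turns), i + 2)]
--         if len(win) >= 3:
--             if len(set(win)) == 1:
--                 ss[i] = "H"
--             elif all((win[k] % 2) != (win[k + 1] % 2) for k in range(len(win) - 1)):
--                 ss[i] = "E"
--     def expand(tag, minlen):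
--         i = 0
--         while i < n:
--             if ss[i] == tag:
--                 j = i
--                 while j < n and ss[j] == tag:
--                     j += 1
--                 if j - i < minlen:
--                     for k in range(i, j):
--                         ss[k] = "C"
--                 i = j
--             else:
--                 i += 1
--     expand("H", 4)
--     expand("E", 3)
--     return ss
-- ===== SOURCE B (Python) =====
-- def _infer_secondary_from_turns(turns):
--     n = len(turns) + 1
--
--     def label(i):
--         win = turns[max(0, i - 2):min(len(turns), i + 2)]
--         if len(win) >= 3:
--             if len(set(win)) == 1:
--                 return "H"
--             if all((win[k] % 2) != (win[k + 1] % 2) for k in range(len(win) - 1)):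
--                 return "E"
--         return "C"
--
--     ss = [label(i) for i in range(n - 1)] + ["C"]
--     minlen = {"H": 4, "E": 3}
--     out = []
--     i = 0
--     while i < n:
--         j = i
--         while j < n and ss[j] == ss[i]:
--             j += 1
--         out.extend(["C" if j - i < minlen.get(ss[i], 0) else ss[i]] * (j - i))
--         i = j
--     return out
-- ===== Notes on version B (the rewrite author's own statement) =====
-- stated objective: simpler
-- what changed: B builds the label list purely (comprehension + ['C']) instead of mutating a preallocated array, and replaces the two separate in-place expand('H',4)/expand('E',3) cleanup passes by one run-length pass that emits each run (or 'C's if the run is below its tag's threshold from a {'H':4,'E':3} lookup) into a fresh output list.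
import Mathlib
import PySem

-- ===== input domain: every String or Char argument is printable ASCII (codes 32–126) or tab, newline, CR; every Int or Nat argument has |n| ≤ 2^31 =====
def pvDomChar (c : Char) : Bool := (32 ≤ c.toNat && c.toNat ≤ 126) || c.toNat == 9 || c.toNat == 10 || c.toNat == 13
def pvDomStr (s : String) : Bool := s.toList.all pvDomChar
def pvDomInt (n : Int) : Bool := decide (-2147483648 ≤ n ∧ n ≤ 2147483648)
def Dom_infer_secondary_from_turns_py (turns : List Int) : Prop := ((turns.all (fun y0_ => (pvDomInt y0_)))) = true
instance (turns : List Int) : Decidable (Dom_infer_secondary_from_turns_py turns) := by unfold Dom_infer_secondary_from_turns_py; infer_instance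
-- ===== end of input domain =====

-- B is a simpler decomposition: a pure label list plus ONE run-length cleanup pass with a
-- {'H':4,'E':3} threshold lookup, instead of A's mutated array and two in-place expand passes.

-- ===== PORT A =====

-- A's inner helper `expand(tag, minlen)`: the outer while-loop over the list becomes the obvious
-- recursion; the inner `while j < n and ss[j] == tag` scan is takeWhile/dropWhile of the same run.
def pvExpand (tag : String) (minlen : Nat) : List String → List String
  | [] => []
  | s :: rest =>
    if s == tag then
      let run := s :: rest.takeWhile (· == tag)
      let rest' := rest.dropWhile (· == tag)
      (if run.length < minlen then List.replicate run.length "C" else run) ++ pvExpand tag minlen rest'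
    else s :: pvExpand tag minlen rest
termination_by l => l.length
decreasing_by
  · exact Nat.lt_succ_of_le (List.length_dropWhile_le _ _)
  · simp

def infer_secondary_from_turns_py (turns : List Int) : List String :=
  let n : Int := (turns.length : Int) + 1
  let ss : List String := List.replicate (turns.length + 1) "C"
  let ss := (PySem.List.pyRange 0 (n - 1) 1).foldl (fun ss i =>
    let win := PySem.List.slice turns (some (max 0 (i - 2))) (some (min (turns.length : Int) (i + 2)))
    if 3 ≤ win.length then
      if (PySem.Set.ofList win).length == 1 then
        PySem.List.pySetD ss i "H"
      else if (PySem.List.pyRange 0 ((win.length : Int) - 1) 1).all (fun k =>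
          PySem.Int.mod (PySem.List.pyGetD win k 0) 2 != PySem.Int.mod (PySem.List.pyGetD win (k + 1) 0) 2) then
        PySem.List.pySetD ss i "E"
      else ss
    else ss) ss
  pvExpand "E" 3 (pvExpand "H" 4 ss)

-- ===== PORT B =====

-- B's helper `label(i)`
def pvLabel (turns : List Int) (i : Int) : String :=
  let win := PySem.List.slice turns (some (max 0 (i - 2))) (some (min (turns.length : Int) (i + 2)))
  if 3 ≤ win.length then
    if (PySem.Set.ofList win).length == 1 then "H"
    else if (PySem.List.pyRange 0 ((win.length : Int) - 1) 1).all (fun k =>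
        PySem.Int.mod (PySem.List.pyGetD win k 0) 2 != PySem.Int.mod (PySem.List.pyGetD win (k + 1) 0) 2) then "E"
    else "C"
  else "C"

-- B's single cleanup pass over runs: emit each run, demoted to 'C's when shorter than its threshold.
def pvCleanRuns : List String → List String
  | [] => []
  | s :: rest =>
    let run := s :: rest.takeWhile (· == s)
    let rest' := rest.dropWhile (· == s)
    let m := PySem.Dict.getD (PySem.Dict.mk [("H", (4 : Nat)), ("E", 3)]) s 0
    List.replicate run.length (if run.length < m then "C" else s) ++ pvCleanRuns rest'
termination_by l => l.length
decreasing_by exact Nat.lt_succ_of_le (List.length_dropWhile_le _ _)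

def infer_secondary_from_turns_py_alt (turns : List Int) : List String :=
  let n : Int := (turns.length : Int) + 1
  let ss := (PySem.List.pyRange 0 (n - 1) 1).map (pvLabel turns) ++ ["C"]
  pvCleanRuns ss

-- ===== PRECONDITION & SPEC =====
def Spec_infer_secondary_from_turns_py (turns : List Int) (out : List String) : Prop := out = infer_secondary_from_turns_py_alt turns
instance (turns : List Int) (out : List String) : Decidable (Spec_infer_secondary_from_turns_py turns out) := by unfold Spec_infer_secondary_from_turns_py; infer_instance

-- ===== CLAIM (what is proved, stated in full; the proofs are below) =====
def Claim_equal_infer_secondary_from_turns_py : Prop := ∀ (turns : List Int), Dom_infer_secondary_from_turns_py turns → Spec_infer_secondary_from_turns_py turns (infer_secondary_from_turns_py turns)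

-- ===== LEMMAS AND PROOFS =====

-- expand passes elementwise over a prefix that contains no `tag`.
theorem pvExpand_skip (tag : String) (m : Nat) (P ys : List String)
    (h : ∀ x ∈ P, x ≠ tag) : pvExpand tag m (P ++ ys) = P ++ pvExpand tag m ys := by
  induction P with
  | nil => simp
  | cons c t ih =>
    have hc : c ≠ tag := h c (by simp)
    rw [List.cons_append, pvExpand]
    simp only [beq_iff_eq, hc, if_false]
    rw [ih (fun x hx => h x (by simp [hx]))]
    simp

-- expand "H" never puts an "E" at the head of a list whose head is not "E".
theorem pvExpand_head_ne_E (xs : List String) (h : xs.head? ≠ some "E") :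
    (pvExpand "H" 4 xs).head? ≠ some "E" := by
  match xs with
  | [] => simp [pvExpand]
  | c :: t =>
    have hc : c ≠ "E" := by simpa using h
    rw [pvExpand]
    by_cases hH : c = "H"
    · simp only [hH, beq_self_eq_true, if_true]
      split
      · simp [List.replicate]
      · simp
    · simp [hH, hc]

-- A run is a replicate of its head.
theorem pv_run_replicate (s : String) (rest : List String) :
    s :: rest.takeWhile (· == s) = List.replicate (s :: rest.takeWhile (· == s)).length s := by
  rw [List.eq_replicate_iff]
  refine ⟨rfl, ?_⟩
  intro b hb
  rw [List.mem_cons] at hb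
  rcases hb with rfl | hb
  · rfl
  · simpa using List.mem_takeWhile_imp hb

-- takeWhile/dropWhile through a uniform prefix followed by a failing head.
theorem pv_takeWhile_run (p : String → Bool) (P ys : List String)
    (hP : ∀ x ∈ P, p x = true) (hy : ∀ h, ys.head? = some h → p h = false) :
    (P ++ ys).takeWhile p = P ∧ (P ++ ys).dropWhile p = ys := by
  induction P with
  | nil =>
    simp only [List.nil_append]
    cases ys with
    | nil => simp
    | cons c t => simp [List.takeWhile, List.dropWhile, hy c rfl]
  | cons c t ih =>
    have hc := hP c (by simp)
    have := ih (fun x hx => hP x (by simp [hx]))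
    simp [hc, this.1, this.2]

-- the tag thresholds looked up by B's pass
theorem pv_getD_H : PySem.Dict.getD (PySem.Dict.mk [("H", (4 : Nat)), ("E", 3)]) "H" 0 = 4 := by decide

theorem pv_getD_E : PySem.Dict.getD (PySem.Dict.mk [("H", (4 : Nat)), ("E", 3)]) "E" 0 = 3 := by decide

theorem pv_getD_other (s : String) (h1 : s ≠ "H") (h2 : s ≠ "E") :
    PySem.Dict.getD (PySem.Dict.mk [("H", (4 : Nat)), ("E", 3)]) s 0 = 0 := by
  simp [PySem.Dict.getD, PySem.Dict.get?, Ne.symm h1, Ne.symm h2]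

-- heads produced by dropWhile fail the predicate
theorem pv_head_dropWhile (p : String → Bool) (l : List String) (h : String)
    (hh : (l.dropWhile p).head? = some h) : p h = false := by
  have := List.head?_dropWhile_not p l
  rw [hh] at this
  exact this

-- THE run-pass lemma: one threshold pass = expand("H",4) then expand("E",3).
theorem pvClean_eq_expand (ss : List String) :
    pvCleanRuns ss = pvExpand "E" 3 (pvExpand "H" 4 ss) := by
  induction ss using pvCleanRuns.induct with
  | case1 => simp [pvCleanRuns, pvExpand]
  | case2 s rest rdw ih =>
    have hrun := pv_run_replicate s rest
    have hsplit : s :: rest = (s :: rest.takeWhile (· == s)) ++ rest.dropWhile (· == s) := by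
      rw [List.cons_append, List.takeWhile_append_dropWhile]
    have hheadr : ∀ h, (rest.dropWhile (· == s)).head? = some h → h ≠ s := by
      intro h hh
      have := pv_head_dropWhile (· == s) rest h hh
      simpa using this
    rw [pvCleanRuns]
    by_cases hH : s = "H"
    · subst hH
      rw [pvExpand]
      simp only [beq_self_eq_true, if_true]
      have hprefE : ∀ x ∈ (if ("H" :: rest.takeWhile (· == "H")).length < 4 then
            List.replicate ("H" :: rest.takeWhile (· == "H")).length "C"
          else "H" :: rest.takeWhile (· == "H")), x ≠ "E" := by
        intro x hx
        split at hx
        · rw [List.eq_of_mem_replicate hx]; decide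
        · rw [hrun] at hx
          rw [List.eq_of_mem_replicate hx]; decide
      rw [pvExpand_skip "E" 3 _ _ hprefE, ih, pv_getD_H]
      congr 1
      by_cases h4 : ("H" :: rest.takeWhile (· == "H")).length < 4
      · rw [if_pos h4, if_pos h4]
      · rw [if_neg h4, if_neg h4]
        exact hrun.symm
    · by_cases hE : s = "E"
      · subst hE
        conv_rhs => rw [hsplit]
        have hallH : ∀ x ∈ "E" :: rest.takeWhile (· == "E"), x ≠ "H" := by
          intro x hx
          rw [hrun] at hx
          rw [List.eq_of_mem_replicate hx]; decide
        rw [pvExpand_skip "H" 4 _ _ hallH]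
        have hzhead : (pvExpand "H" 4 (rest.dropWhile (· == "E"))).head? ≠ some "E" := by
          apply pvExpand_head_ne_E
          intro hc
          exact hheadr "E" hc rfl
        rw [List.cons_append, pvExpand]
        simp only [beq_self_eq_true, if_true]
        have htdw := pv_takeWhile_run (· == "E") (rest.takeWhile (· == "E"))
          (pvExpand "H" 4 (rest.dropWhile (· == "E")))
          (fun x hx => List.mem_takeWhile_imp (p := fun y => y == "E") hx)
          (by
            intro h hh
            rcases eq_or_ne h "E" with rfl | hne
            · exact absurd hh hzhead
            · simpa using hne)
        rw [htdw.1, htdw.2, ih, pv_getD_E]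
        congr 1
        by_cases h3 : ("E" :: rest.takeWhile (· == "E")).length < 3
        · rw [if_pos h3, if_pos h3]
        · rw [if_neg h3, if_neg h3]
          exact hrun.symm
      · rw [pv_getD_other s hH hE]
        conv_rhs => rw [hsplit]
        have halls : ∀ tg : String, tg ≠ s → ∀ x ∈ s :: rest.takeWhile (· == s), x ≠ tg := by
          intro tg htg x hx
          rw [hrun] at hx
          rw [List.eq_of_mem_replicate hx]
          exact fun hc => htg hc.symm
        rw [pvExpand_skip "H" 4 _ _ (halls "H" (fun hc => hH hc.symm)),
            pvExpand_skip "E" 3 _ _ (halls "E" (fun hc => hE hc.symm)), ih]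
        congr 1
        rw [if_neg (Nat.not_lt_zero _)]
        simpa using hrun.symm

-- Phase-1 loop invariant: A's index loop fills position i with pvLabel turns i.
theorem pv_phase1 (turns : List Int) (m : Nat) (hm : m ≤ turns.length) :
    (PySem.List.pyRange 0 (m : Int) 1).foldl (fun ss i =>
      let win := PySem.List.slice turns (some (max 0 (i - 2))) (some (min (turns.length : Int) (i + 2)))
      if 3 ≤ win.length then
        if (PySem.Set.ofList win).length == 1 then
          PySem.List.pySetD ss i "H"
        else if (PySem.List.pyRange 0 ((win.length : Int) - 1) 1).all (fun k =>
            PySem.Int.mod (PySem.List.pyGetD win k 0) 2 != PySem.Int.mod (PySem.List.pyGetD win (k + 1) 0) 2) then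
          PySem.List.pySetD ss i "E"
        else ss
      else ss) (List.replicate (turns.length + 1) "C")
    = (List.range m).map (fun k : Nat => pvLabel turns (k : Int)) ++ List.replicate (turns.length + 1 - m) "C" := by
  induction m with
  | zero =>
    rw [show ((0 : Nat) : Int) = 0 from rfl, PySem.List.pyRange_one_eq_nil le_rfl]
    simp
  | succ m ihm =>
    have hm' : m ≤ turns.length := Nat.le_of_succ_le hm
    have hcast : ((m + 1 : Nat) : Int) = (m : Int) + 1 := by push_cast; ring
    rw [hcast, PySem.List.pyRange_one_succ_right (by exact_mod_cast Nat.zero_le m),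
      List.foldl_append, ihm hm']
    simp only [List.foldl_cons, List.foldl_nil]
    have hrep : turns.length + 1 - m = (turns.length - m) + 1 := by omega
    have hset : ∀ v : String,
        PySem.List.pySetD
          ((List.range m).map (fun k : Nat => pvLabel turns (k : Int)) ++
            List.replicate (turns.length + 1 - m) "C") ((m : Int)) v
        = (List.range m).map (fun k : Nat => pvLabel turns (k : Int)) ++
            v :: List.replicate (turns.length - m) "C" := by
      intro v
      rw [PySem.List.pySetD_natCast, hrep, List.replicate_succ, List.set_append]
      simp
    rw [List.range_succ, List.map_append]
    simp only [List.map_cons, List.map_nil, pvLabel, Nat.succ_sub_succ]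
    split_ifs with h1 h2 h3 <;>
      simp [hset, hrep, List.replicate_succ, List.append_assoc]

-- ===== VERDICT (by name: the statement is the Claim_ definition above) =====
theorem infer_secondary_from_turns_py_spec : Claim_equal_infer_secondary_from_turns_py := by
  intro turns _
  unfold Spec_infer_secondary_from_turns_py infer_secondary_from_turns_py infer_secondary_from_turns_py_alt
  simp only [add_sub_cancel_right]
  rw [pvClean_eq_expand, pv_phase1 turns turns.length le_rfl]
  simp only [PySem.List.pyRange_zero_natCast, List.map_map]
  simp [Function.comp_def]
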